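-- pv_equiv track=rewrite | github.com/sweep7125/rulesets | .ci/optimize.py | render_domains_mihomo
-- ===== SOURCE A (Python) =====
-- from typing import Iterable, Iterator, List, Tuple, Set
--
-- def label_count(d: str) -> int:
--     return d.count(".") + 1 if d else 0
--
-- def _mihomo_complexity(prefix: str, base: str) -> int:
--     if prefix == "":
--         return 4 if "*" in base else 0
--     if prefix == ".":
--         return 1
--     if prefix == "+.":
--         return 2
--     if prefix == "*.":
--         return 3
--     return 5
--
-- def render_domains_mihomo(e: Set[str], dot: Set[str], plus: Set[str], star: Set[str]) -> List[str]:
--     items: List[Tuple[str, str]] = []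
--     items += [(b, ".") for b in dot]
--     items += [(b, "+.") for b in plus]
--     items += [(b, "*.") for b in star]
--     items += [(b, "") for b in e]
--     items.sort(key=lambda t: (_mihomo_complexity(t[1], t[0]), label_count(t[0]), t[0]))
--     return [f"{p}{b}" if p else b for (b, p) in items]
-- ===== SOURCE B (Python) =====
-- def label_count(d: str) -> int:
--     return d.count(".") + 1 if d else 0
--
-- def render_domains_mihomo(e, dot, plus, star):
--     key = lambda b: (label_count(b), b)
--     e_nostar = sorted((b for b in e if "*" not in b), key=key)
--     dots     = sorted(dot, key=key)
--     pluses   = sorted(plus, key=key)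
--     stars    = sorted(star, key=key)
--     e_star   = sorted((b for b in e if "*" in b), key=key)
--     return [*e_nostar,
--             *[f".{b}"  for b in dots],
--             *[f"+.{b}" for b in pluses],
--             *[f"*.{b}" for b in stars],
--             *e_star]
-- ===== Notes on version B (the rewrite author's own statement) =====
-- stated objective: alternative
-- what changed: Instead of tagging every base with a prefix, sorting one global list by a composite (complexity, label_count, base) key and formatting afterwards, B never computes a complexity: it splits the exact set by whether the base contains '*', sorts each of the five groups independently by (label_count, base), formats each group with its own prefix and concatenates the groups in the fixed complexity order.
import Mathlib
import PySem

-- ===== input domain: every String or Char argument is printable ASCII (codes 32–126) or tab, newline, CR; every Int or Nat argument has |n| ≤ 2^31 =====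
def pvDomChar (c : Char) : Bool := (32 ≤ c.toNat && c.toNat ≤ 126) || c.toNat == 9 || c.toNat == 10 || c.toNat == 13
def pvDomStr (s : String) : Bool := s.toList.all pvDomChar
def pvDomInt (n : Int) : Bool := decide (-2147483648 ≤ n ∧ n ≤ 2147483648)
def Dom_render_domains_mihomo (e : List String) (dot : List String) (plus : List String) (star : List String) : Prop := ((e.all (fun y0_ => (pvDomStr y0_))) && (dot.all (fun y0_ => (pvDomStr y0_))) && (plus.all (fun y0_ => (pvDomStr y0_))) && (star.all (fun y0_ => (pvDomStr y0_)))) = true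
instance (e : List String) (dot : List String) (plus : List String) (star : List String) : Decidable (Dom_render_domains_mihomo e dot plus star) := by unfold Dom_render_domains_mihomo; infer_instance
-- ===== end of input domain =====

-- B replaces A's single global sort by a composite (complexity, label_count, base) key with five
-- independent (label_count, base)-sorted buckets concatenated in the fixed complexity order (alternative decomposition).

-- ===== PORT A =====
-- label_count(d) = d.count(".") + 1 if d else 0
def pvLabelCount (d : String) : Int := if d ≠ "" then ((PySem.Str.count d ".") : Int) + 1 else 0

-- _mihomo_complexity(prefix, base)
def pvComplexity (pfx base : String) : Int :=
  if pfx = "" then (if PySem.Str.isIn "*" base then 4 else 0)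
  else if pfx = "." then 1
  else if pfx = "+." then 2
  else if pfx = "*." then 3
  else 5

-- Python's 3-tuple sort key (complexity, label_count, base) ported as nested lexicographic
-- pairs (Lex), which is exactly Python's tuple comparison; String '<' is Python's str '<'.
def pvKeyA (t : String × String) : Lex (Int × Lex (Int × String)) :=
  toLex (pvComplexity t.2 t.1, toLex (pvLabelCount t.1, t.1))

def render_domains_mihomo (e : List String) (dot : List String) (plus : List String) (star : List String) : List String :=
  let items : List (String × String) :=
    (((([] : List (String × String))
      ++ dot.map (fun b => (b, ".")))
      ++ plus.map (fun b => (b, "+.")))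
      ++ star.map (fun b => (b, "*.")))
      ++ e.map (fun b => (b, ""))
  (PySem.List.sorted items pvKeyA false).map (fun t => if t.2 ≠ "" then t.2 ++ t.1 else t.1)

-- ===== PORT B =====
-- B's per-bucket sort key (label_count(b), b), again as a Lex pair.
def pvKeyB (b : String) : Lex (Int × String) := toLex (pvLabelCount b, b)

def render_domains_mihomo_alt (e : List String) (dot : List String) (plus : List String) (star : List String) : List String :=
  (PySem.List.sorted (e.filter (fun b => !(PySem.Str.isIn "*" b))) pvKeyB false)
  ++ (PySem.List.sorted dot pvKeyB false).map (fun b => "." ++ b)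
  ++ (PySem.List.sorted plus pvKeyB false).map (fun b => "+." ++ b)
  ++ (PySem.List.sorted star pvKeyB false).map (fun b => "*." ++ b)
  ++ (PySem.List.sorted (e.filter (fun b => PySem.Str.isIn "*" b)) pvKeyB false)

-- ===== PRECONDITION & SPEC =====
-- The Python parameters are sets; under the type convention each List String models a set's
-- DISTINCT elements, so Pre_ states exactly that (it excludes no set input A accepts).
def Pre_render_domains_mihomo (e : List String) (dot : List String) (plus : List String) (star : List String) : Prop :=
  e.Nodup ∧ dot.Nodup ∧ plus.Nodup ∧ star.Nodup
instance (e : List String) (dot : List String) (plus : List String) (star : List String) : Decidable (Pre_render_domains_mihomo e dot plus star) := by unfold Pre_render_domains_mihomo; infer_instance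

def pvWitness_render_domains_mihomo : List String × List String × List String × List String :=
  (["a", "x.*"], ["m"], ["n.n"], ["q"])

def Spec_render_domains_mihomo (e : List String) (dot : List String) (plus : List String) (star : List String) (out : List String) : Prop := out = render_domains_mihomo_alt e dot plus star
instance (e : List String) (dot : List String) (plus : List String) (star : List String) (out : List String) : Decidable (Spec_render_domains_mihomo e dot plus star out) := by unfold Spec_render_domains_mihomo; infer_instance

-- ===== CLAIM (what is proved, stated in full; the proofs are below) =====
def Claim_equal_render_domains_mihomo : Prop := ∀ (e : List String) (dot : List String) (plus : List String) (star : List String), Dom_render_domains_mihomo e dot plus star → Pre_render_domains_mihomo e dot plus star → Spec_render_domains_mihomo e dot plus star (render_domains_mihomo e dot plus star)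

-- ===== LEMMAS AND PROOFS =====

theorem pvKeyB_inj : Function.Injective pvKeyB := by
  intro a b h
  exact (by simpa [pvKeyB, Prod.ext_iff] using congrArg ofLex h : pvLabelCount a = pvLabelCount b ∧ a = b).2

-- strict pairwise order of a sorted duplicate-free bucket
theorem pairwise_lt_sorted_of_nodup (l : List String) (hl : l.Nodup) :
    (PySem.List.sorted l pvKeyB false).Pairwise (fun a b => pvKeyB a < pvKeyB b) := by
  have h1 := PySem.List.sorted_pairwise l pvKeyB
  have h2 : (PySem.List.sorted l pvKeyB false).Nodup :=
    (PySem.List.sorted_perm l pvKeyB false).nodup_iff.mpr hl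
  exact (h1.and h2).imp (fun {a b} h =>
    lt_of_le_of_ne h.1 (fun hk => h.2 (pvKeyB_inj hk)))

theorem keyA_lt_of_c_lt {t u : String × String}
    (h : pvComplexity t.2 t.1 < pvComplexity u.2 u.1) : pvKeyA t < pvKeyA u := by
  simp [pvKeyA, Prod.Lex.lt_iff]
  exact Or.inl h

theorem keyA_lt_of_c_eq {t u : String × String}
    (hc : pvComplexity t.2 t.1 = pvComplexity u.2 u.1)
    (hb : pvKeyB t.1 < pvKeyB u.1) : pvKeyA t < pvKeyA u := by
  simp [pvKeyA, Prod.Lex.lt_iff, pvKeyB] at *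
  exact Or.inr ⟨hc, hb⟩

theorem pv_sorted_items_eq_buckets (e dot plus star : List String)
    (he : e.Nodup) (hd : dot.Nodup) (hp : plus.Nodup) (hs : star.Nodup) :
    PySem.List.sorted
      ((((([] : List (String × String))
        ++ dot.map (fun b => (b, ".")))
        ++ plus.map (fun b => (b, "+.")))
        ++ star.map (fun b => (b, "*.")))
        ++ e.map (fun b => (b, ""))) pvKeyA false
    = (PySem.List.sorted (e.filter (fun b => !(PySem.Str.isIn "*" b))) pvKeyB false).map (fun b => (b, ""))
      ++ ((PySem.List.sorted dot pvKeyB false).map (fun b => (b, "."))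
      ++ ((PySem.List.sorted plus pvKeyB false).map (fun b => (b, "+."))
      ++ ((PySem.List.sorted star pvKeyB false).map (fun b => (b, "*."))
      ++ (PySem.List.sorted (e.filter (fun b => PySem.Str.isIn "*" b)) pvKeyB false).map (fun b => (b, ""))))) := by
  apply PySem.List.sorted_eq_of_perm_of_pairwise_lt
  · -- permutation
    rw [List.perm_iff_count]
    intro v
    have c0 := List.perm_iff_count.mp ((PySem.List.sorted_perm (e.filter (fun b => !(PySem.Str.isIn "*" b))) pvKeyB false).map (fun b => (b, ""))) v
    have c1 := List.perm_iff_count.mp ((PySem.List.sorted_perm dot pvKeyB false).map (fun b => (b, "."))) v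
    have c2 := List.perm_iff_count.mp ((PySem.List.sorted_perm plus pvKeyB false).map (fun b => (b, "+."))) v
    have c3 := List.perm_iff_count.mp ((PySem.List.sorted_perm star pvKeyB false).map (fun b => (b, "*."))) v
    have c4 := List.perm_iff_count.mp ((PySem.List.sorted_perm (e.filter (fun b => PySem.Str.isIn "*" b)) pvKeyB false).map (fun b => (b, ""))) v
    have cE := List.perm_iff_count.mp ((List.filter_append_perm (fun b => PySem.Str.isIn "*" b) e).map (fun b => (b, ""))) v
    simp only [List.map_append, List.count_append, List.count_nil] at c0 c1 c2 c3 c4 cE ⊢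
    omega
  · -- pairwise strict order
    have hmem : ∀ (l : List String) (x : String), x ∈ PySem.List.sorted l pvKeyB false → x ∈ l :=
      fun l x h => (PySem.List.mem_sorted l pvKeyB false x).mp h
    have hc0 : ∀ x ∈ PySem.List.sorted (e.filter (fun b => !(PySem.Str.isIn "*" b))) pvKeyB false,
        pvComplexity "" x = 0 := by
      intro x hx
      have := (List.mem_filter.mp (hmem _ _ hx)).2
      simp at this
      simp [pvComplexity, this]
    have hc4 : ∀ x ∈ PySem.List.sorted (e.filter (fun b => PySem.Str.isIn "*" b)) pvKeyB false,
        pvComplexity "" x = 4 := by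
      intro x hx
      have := (List.mem_filter.mp (hmem _ _ hx)).2
      simp at this
      simp [pvComplexity, this]
    simp only [List.pairwise_append, List.pairwise_map, List.mem_map, List.mem_append]
    repeat' apply And.intro
    · -- e (no star) bucket
      refine List.Pairwise.imp_of_mem ?_ (pairwise_lt_sorted_of_nodup _ (he.filter _))
      intro a b ha hb h
      exact keyA_lt_of_c_eq ((hc0 a ha).trans (hc0 b hb).symm) h
    · -- dot bucket
      exact (pairwise_lt_sorted_of_nodup dot hd).imp
        (fun {a b} h => keyA_lt_of_c_eq (by simp [pvComplexity]) h)
    · -- plus bucket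
      exact (pairwise_lt_sorted_of_nodup plus hp).imp
        (fun {a b} h => keyA_lt_of_c_eq (by simp [pvComplexity]) h)
    · -- star bucket
      exact (pairwise_lt_sorted_of_nodup star hs).imp
        (fun {a b} h => keyA_lt_of_c_eq (by simp [pvComplexity]) h)
    · -- e (star) bucket
      refine List.Pairwise.imp_of_mem ?_ (pairwise_lt_sorted_of_nodup _ (he.filter _))
      intro a b ha hb h
      exact keyA_lt_of_c_eq ((hc4 a ha).trans (hc4 b hb).symm) h
    · -- star block before e-star block
      rintro a ⟨x, hx, rfl⟩ b ⟨y, hy, rfl⟩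
      apply keyA_lt_of_c_lt
      show pvComplexity "*." x < pvComplexity "" y
      rw [hc4 y hy]; simp [pvComplexity]
    · -- plus block before star / e-star blocks
      rintro a ⟨x, hx, rfl⟩ b (⟨y, hy, rfl⟩ | ⟨y, hy, rfl⟩)
      · apply keyA_lt_of_c_lt
        show pvComplexity "+." x < pvComplexity "*." y
        simp [pvComplexity]
      · apply keyA_lt_of_c_lt
        show pvComplexity "+." x < pvComplexity "" y
        rw [hc4 y hy]; simp [pvComplexity]
    · -- dot block before plus / star / e-star blocks
      rintro a ⟨x, hx, rfl⟩ b (⟨y, hy, rfl⟩ | ⟨y, hy, rfl⟩ | ⟨y, hy, rfl⟩)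
      · apply keyA_lt_of_c_lt
        show pvComplexity "." x < pvComplexity "+." y
        simp [pvComplexity]
      · apply keyA_lt_of_c_lt
        show pvComplexity "." x < pvComplexity "*." y
        simp [pvComplexity]
      · apply keyA_lt_of_c_lt
        show pvComplexity "." x < pvComplexity "" y
        rw [hc4 y hy]; simp [pvComplexity]
    · -- e-no-star block first
      rintro a ⟨x, hx, rfl⟩ b (⟨y, hy, rfl⟩ | ⟨y, hy, rfl⟩ | ⟨y, hy, rfl⟩ | ⟨y, hy, rfl⟩)
      · apply keyA_lt_of_c_lt
        show pvComplexity "" x < pvComplexity "." y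
        rw [hc0 x hx]; simp [pvComplexity]
      · apply keyA_lt_of_c_lt
        show pvComplexity "" x < pvComplexity "+." y
        rw [hc0 x hx]; simp [pvComplexity]
      · apply keyA_lt_of_c_lt
        show pvComplexity "" x < pvComplexity "*." y
        rw [hc0 x hx]; simp [pvComplexity]
      · apply keyA_lt_of_c_lt
        show pvComplexity "" x < pvComplexity "" y
        rw [hc0 x hx, hc4 y hy]; norm_num


theorem render_domains_mihomo_spec' (e dot plus star : List String)
    (he : e.Nodup) (hd : dot.Nodup) (hp : plus.Nodup) (hs : star.Nodup) :
    render_domains_mihomo e dot plus star = render_domains_mihomo_alt e dot plus star := by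
  simp only [render_domains_mihomo, render_domains_mihomo_alt]
  rw [pv_sorted_items_eq_buckets e dot plus star he hd hp hs]
  simp only [List.map_append, List.map_map]
  simp [Function.comp_def]

-- ===== VERDICT (by name: the statement is the Claim_ definition above) =====
theorem render_domains_mihomo_spec : Claim_equal_render_domains_mihomo := by
  intro e dot plus star _ hpre
  exact render_domains_mihomo_spec' e dot plus star hpre.1 hpre.2.1 hpre.2.2.1 hpre.2.2.2
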